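-- pv_equiv track=rewrite | github.com/AstridSoumoy/INF8775 | TP3-H20/algo.py | estInfectee
-- ===== SOURCE A (Python) =====
-- def estInfectee(ligne, listInfectee, k, graph):
--     count = 0
--     for i in range(0, len(graph)):
--         if (i in listInfectee) and (ligne[i] == 1):
--             count += 1
--     if count >= k:
--         return True
--     else:
--         return False
-- ===== SOURCE B (Python) =====
-- def estInfectee(ligne, listInfectee, k, graph):
--     infected = set(listInfectee)
--     count = sum(1 for i in infected if 0 <= i < len(graph) and ligne[i] == 1)
--     return count >= k
-- ===== Notes on version B (the rewrite author's own statement) =====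
-- stated objective: faster
-- what changed: Instead of scanning every graph index and doing a linear 'i in listInfectee' membership test per index, B deduplicates listInfectee into a set once and counts the infected indices that lie in range with ligne[i] == 1, removing the O(n*m) nested scan.
import Mathlib
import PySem

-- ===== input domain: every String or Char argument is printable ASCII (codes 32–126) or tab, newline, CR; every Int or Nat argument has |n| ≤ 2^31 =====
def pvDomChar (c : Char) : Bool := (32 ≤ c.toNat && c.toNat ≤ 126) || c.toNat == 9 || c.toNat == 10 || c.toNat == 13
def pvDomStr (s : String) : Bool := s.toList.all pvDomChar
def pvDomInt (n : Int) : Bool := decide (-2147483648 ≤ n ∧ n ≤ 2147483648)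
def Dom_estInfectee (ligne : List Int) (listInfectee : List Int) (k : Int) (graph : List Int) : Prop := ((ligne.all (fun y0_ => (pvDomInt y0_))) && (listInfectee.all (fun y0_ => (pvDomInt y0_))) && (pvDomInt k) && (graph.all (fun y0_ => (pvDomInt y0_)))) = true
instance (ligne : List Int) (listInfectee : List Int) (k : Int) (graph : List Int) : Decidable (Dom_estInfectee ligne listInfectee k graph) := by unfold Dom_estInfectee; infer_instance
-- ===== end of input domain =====

-- B replaces A's scan of every graph index (with a linear membership test per index) by a
-- single pass over the deduplicated infected set, counting in-range indices with ligne[i] == 1.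

-- ===== PORT A =====
def estInfectee (ligne : List Int) (listInfectee : List Int) (k : Int) (graph : List Int) : Bool :=
  let count : Int :=
    (PySem.List.pyRange 0 graph.length 1).foldl
      (fun c i => if listInfectee.contains i ∧ PySem.List.pyGet? ligne i = some 1 then c + 1 else c) 0
  if count ≥ k then true else false

-- ===== PORT B =====
def estInfectee_alt (ligne : List Int) (listInfectee : List Int) (k : Int) (graph : List Int) : Bool :=
  let infected : PySem.Set Int := PySem.Set.ofList listInfectee
  let count : Int :=
    (infected.filter (fun i => decide (0 ≤ i ∧ i < (graph.length : Int) ∧ PySem.List.pyGet? ligne i = some 1))).length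
  decide (count ≥ k)

-- ===== PRECONDITION & SPEC =====
-- Pre_ excludes exactly the inputs on which the Python A raises IndexError: an infected index
-- inside [0, len(graph)) but beyond len(ligne).  (B raises on the same inputs.)
def Pre_estInfectee (ligne : List Int) (listInfectee : List Int) (k : Int) (graph : List Int) : Prop :=
  ∀ x ∈ listInfectee, 0 ≤ x → x < (graph.length : Int) → x < (ligne.length : Int)
instance (ligne : List Int) (listInfectee : List Int) (k : Int) (graph : List Int) : Decidable (Pre_estInfectee ligne listInfectee k graph) := by unfold Pre_estInfectee; infer_instance
def pvWitness_estInfectee : List Int × List Int × Int × List Int := ([1, 0, 1], [0, 2, 2, -1], 2, [0, 0, 0])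

def Spec_estInfectee (ligne : List Int) (listInfectee : List Int) (k : Int) (graph : List Int) (out : Bool) : Prop := out = estInfectee_alt ligne listInfectee k graph
instance (ligne : List Int) (listInfectee : List Int) (k : Int) (graph : List Int) (out : Bool) : Decidable (Spec_estInfectee ligne listInfectee k graph out) := by unfold Spec_estInfectee; infer_instance

-- ===== CLAIM (what is proved, stated in full; the proofs are below) =====
def Claim_equal_estInfectee : Prop := ∀ (ligne : List Int) (listInfectee : List Int) (k : Int) (graph : List Int), Dom_estInfectee ligne listInfectee k graph → Pre_estInfectee ligne listInfectee k graph → Spec_estInfectee ligne listInfectee k graph (estInfectee ligne listInfectee k graph)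

-- ===== LEMMAS AND PROOFS =====

-- A's counting loop is the length of the filtered list.
theorem foldl_count_filter (q : Int → Bool) (l : List Int) (c : Int) :
    l.foldl (fun c i => if q i then c + 1 else c) c = c + ((l.filter q).length : Int) := by
  induction l generalizing c with
  | nil => simp
  | cons x xs ih =>
      by_cases h : q x = true <;> simp [List.foldl_cons, List.filter_cons, h, ih] <;> ring

-- Two Nodup filtered lists with the same membership have the same length.
theorem length_eq_of_nodup_mem {l₁ l₂ : List Int} (h₁ : l₁.Nodup) (h₂ : l₂.Nodup)
    (h : ∀ x, x ∈ l₁ ↔ x ∈ l₂) : l₁.length = l₂.length :=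
  (((List.perm_ext_iff_of_nodup h₁ h₂).2 h)).length_eq

theorem estInfectee_spec : Claim_equal_estInfectee := by
  intro ligne listInfectee k graph _ _
  unfold Spec_estInfectee estInfectee estInfectee_alt
  have hcount :
      (PySem.List.pyRange 0 graph.length 1).foldl
        (fun c i => if listInfectee.contains i ∧ PySem.List.pyGet? ligne i = some 1 then c + 1 else c) 0
      = (((PySem.Set.ofList listInfectee).filter
          (fun i => decide (0 ≤ i ∧ i < (graph.length : Int) ∧ PySem.List.pyGet? ligne i = some 1))).length : Int) := by
    have h1 := foldl_count_filter
      (fun i => decide (listInfectee.contains i = true ∧ PySem.List.pyGet? ligne i = some 1))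
      (PySem.List.pyRange 0 graph.length 1) 0
    have hfun : (fun (c : Int) (i : Int) => if listInfectee.contains i ∧ PySem.List.pyGet? ligne i = some 1 then c + 1 else c)
        = (fun c i => if decide (listInfectee.contains i = true ∧ PySem.List.pyGet? ligne i = some 1) = true then c + 1 else c) := by
      funext c i; simp
    rw [hfun, h1]
    have hlen : ((PySem.List.pyRange 0 graph.length 1).filter
          (fun i => decide (listInfectee.contains i = true ∧ PySem.List.pyGet? ligne i = some 1))).length
        = ((PySem.Set.ofList listInfectee).filter
          (fun i => decide (0 ≤ i ∧ i < (graph.length : Int) ∧ PySem.List.pyGet? ligne i = some 1))).length := by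
      apply length_eq_of_nodup_mem
      · exact (PySem.List.nodup_pyRange_one 0 graph.length).filter _
      · exact (PySem.Set.nodup_ofList listInfectee).filter _
      · intro x
        simp only [List.mem_filter, PySem.List.mem_pyRange_one, PySem.Set.mem_ofList,
          decide_eq_true_eq, List.contains_eq_mem]
        constructor
        · rintro ⟨⟨hx0, hxn⟩, hm, hg⟩; exact ⟨by simpa using hm, hx0, hxn, hg⟩
        · rintro ⟨hm, hx0, hxn, hg⟩; exact ⟨⟨hx0, hxn⟩, by simpa using hm, hg⟩
    omega
  rw [hcount]
  dsimp only
  split_ifs with h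
  · exact (decide_eq_true h).symm
  · exact (decide_eq_false h).symm
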